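-- pv_equiv track=rewrite | github.com/Rodrycue18/Algorithims1 | python/guia7.py | appBanco
-- ===== SOURCE A (Python) =====
-- def appBanco(lista):
--     dineroCuenta=0
--     for i in range(len(lista)):
--         if ((lista[i])[0])=='I':
--             dineroCuenta = ((lista[i])[1]) + dineroCuenta
--         elif((lista[i])[0])=='R':
--             dineroCuenta = dineroCuenta - ((lista[i])[1])
--
--     return dineroCuenta
-- ===== SOURCE B (Python) =====
-- def appBanco(lista):
--     depositos = sum(t[1] for t in lista if t[0] == 'I')
--     retiros = sum(t[1] for t in lista if t[0] == 'R')
--     return depositos - retiros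
-- ===== Notes on version B (the rewrite author's own statement) =====
-- stated objective: simpler
-- what changed: Replaces the index-driven loop with one interleaved accumulator by two filtered sums (deposits and withdrawals) combined once at the end.
import Mathlib
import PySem

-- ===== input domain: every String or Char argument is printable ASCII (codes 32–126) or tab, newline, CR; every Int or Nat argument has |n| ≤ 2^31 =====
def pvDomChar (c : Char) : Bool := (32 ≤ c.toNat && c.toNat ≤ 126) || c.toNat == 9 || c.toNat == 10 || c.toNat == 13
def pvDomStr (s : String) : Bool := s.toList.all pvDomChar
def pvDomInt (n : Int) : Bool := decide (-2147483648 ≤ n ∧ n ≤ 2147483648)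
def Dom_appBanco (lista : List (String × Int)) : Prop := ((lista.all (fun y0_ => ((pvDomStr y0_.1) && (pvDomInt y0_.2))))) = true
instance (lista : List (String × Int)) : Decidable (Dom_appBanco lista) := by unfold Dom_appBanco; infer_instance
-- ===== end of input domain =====

-- ===== PORT A =====
-- Port of A: for-loop over range(len(lista)) with an interleaved accumulator.
def appBanco (lista : List (String × Int)) : Int :=
  (PySem.List.pyRange 0 (PySem.List.len lista) 1).foldl
    (fun dineroCuenta i =>
      let t := PySem.List.pyGetD lista i ("", 0)
      if t.1 == "I" then t.2 + dineroCuenta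
      else if t.1 == "R" then dineroCuenta - t.2
      else dineroCuenta) 0

-- ===== PORT B =====
-- Port of B: two filtered sums, combined once.
def appBanco_alt (lista : List (String × Int)) : Int :=
  ((lista.filter (fun t => t.1 == "I")).map Prod.snd).sum
    - ((lista.filter (fun t => t.1 == "R")).map Prod.snd).sum

-- ===== PRECONDITION & SPEC =====
def Spec_appBanco (lista : List (String × Int)) (out : Int) : Prop := out = appBanco_alt lista
instance (lista : List (String × Int)) (out : Int) : Decidable (Spec_appBanco lista out) := by unfold Spec_appBanco; infer_instance

-- ===== CLAIM (what is proved, stated in full; the proofs are below) =====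
def Claim_equal_appBanco : Prop := ∀ (lista : List (String × Int)), Dom_appBanco lista → Spec_appBanco lista (appBanco lista)

-- ===== LEMMAS AND PROOFS =====

theorem appBanco_foldl_list (lista : List (String × Int)) (acc : Int) :
    lista.foldl (fun dineroCuenta t =>
      if t.1 == "I" then t.2 + dineroCuenta
      else if t.1 == "R" then dineroCuenta - t.2
      else dineroCuenta) acc
    = acc + ((lista.filter (fun t => t.1 == "I")).map Prod.snd).sum
        - ((lista.filter (fun t => t.1 == "R")).map Prod.snd).sum := by
  induction lista generalizing acc with
  | nil => simp
  | cons h t ih =>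
    simp only [List.foldl_cons, List.filter_cons]
    rw [ih]
    by_cases h1 : h.1 == "I"
    · have h2 : (h.1 == "R") = false := by
        simp only [beq_iff_eq] at h1 ⊢; simp [h1]
      simp only [h1, h2, if_true, if_false, Bool.false_eq_true, List.map_cons, List.sum_cons]
      ring
    · by_cases h2 : h.1 == "R"
      · simp only [h1, h2, if_true, if_false, Bool.false_eq_true, List.map_cons, List.sum_cons]
        ring
      · simp only [h1, h2, Bool.false_eq_true, if_false]

theorem appBanco_eq_list_foldl (lista : List (String × Int)) :
    appBanco lista = lista.foldl (fun dineroCuenta t =>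
      if t.1 == "I" then t.2 + dineroCuenta
      else if t.1 == "R" then dineroCuenta - t.2
      else dineroCuenta) 0 :=
  PySem.List.foldl_pyRange_zero_pyGetD lista ("", 0)
    (fun dineroCuenta t =>
      if t.1 == "I" then t.2 + dineroCuenta
      else if t.1 == "R" then dineroCuenta - t.2
      else dineroCuenta) 0

-- ===== VERDICT (by name: the statement is the Claim_ definition above) =====
theorem appBanco_spec : Claim_equal_appBanco := by
  intro lista _
  unfold Spec_appBanco appBanco_alt
  rw [appBanco_eq_list_foldl, appBanco_foldl_list]
  ring
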